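-- pv_equiv track=rewrite | github.com/3LENDERMAN/Python_projects | 02/rivendell.py | to_elevenary
-- ===== SOURCE A (Python) =====
-- def to_elevenary(number):
--     value = 0
--     power = 1
--     while number > 0:
--         value += number % 11 * power
--         number //= 11
--         power *= 10
--
--     return value
-- ===== SOURCE B (Python) =====
-- def to_elevenary(number):
--     if number <= 0:
--         return 0
--     return number % 11 + 10 * to_elevenary(number // 11)
-- ===== Notes on version B (the rewrite author's own statement) =====
-- stated objective: simpler
-- what changed: Replaces the iterative loop carrying (value, power) accumulator state by a direct stateless recurrence f(n) = n%11 + 10*f(n//11), with base case 0 for n <= 0.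
import Mathlib
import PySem

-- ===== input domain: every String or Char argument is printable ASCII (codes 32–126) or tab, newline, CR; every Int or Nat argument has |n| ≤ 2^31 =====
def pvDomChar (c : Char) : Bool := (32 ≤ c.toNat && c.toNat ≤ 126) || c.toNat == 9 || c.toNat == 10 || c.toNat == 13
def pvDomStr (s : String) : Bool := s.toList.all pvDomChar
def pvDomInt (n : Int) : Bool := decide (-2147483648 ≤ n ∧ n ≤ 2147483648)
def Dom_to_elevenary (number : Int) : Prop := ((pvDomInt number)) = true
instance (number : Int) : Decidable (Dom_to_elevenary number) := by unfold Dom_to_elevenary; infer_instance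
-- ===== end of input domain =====

-- B replaces the accumulator loop by the stateless recurrence f(n) = n%11 + 10*f(n//11); simpler, same cost.

-- shared termination fact: the recursion variable shrinks (cited by both ports' decreasing_by)
theorem pvFloordiv11_toNat_lt (n : Int) (h : 0 < n) :
    (PySem.Int.floordiv n 11).toNat < n.toNat := by
  rw [PySem.Int.floordiv_eq_ediv_of_pos (show (0:Int) < 11 by norm_num)]
  have h1 := Int.emod_nonneg n (show (11:Int) ≠ 0 by norm_num)
  have h2 := Int.mul_ediv_add_emod n 11
  omega

-- ===== PORT A =====
-- the while loop of A: state (number, value, power)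
def toElevenaryLoopA (number value power : Int) : Int :=
  if h : 0 < number then
    toElevenaryLoopA (PySem.Int.floordiv number 11) (value + PySem.Int.mod number 11 * power) (power * 10)
  else value
termination_by number.toNat
decreasing_by exact pvFloordiv11_toNat_lt number h

def to_elevenary (number : Int) : Int := toElevenaryLoopA number 0 1

-- ===== PORT B =====
def to_elevenary_alt (number : Int) : Int :=
  if h : number ≤ 0 then 0
  else PySem.Int.mod number 11 + 10 * to_elevenary_alt (PySem.Int.floordiv number 11)
termination_by number.toNat
decreasing_by exact pvFloordiv11_toNat_lt number (by omega)

-- ===== PRECONDITION & SPEC =====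
def Spec_to_elevenary (number : Int) (out : Int) : Prop := out = to_elevenary_alt number
instance (number : Int) (out : Int) : Decidable (Spec_to_elevenary number out) := by unfold Spec_to_elevenary; infer_instance

-- ===== CLAIM (what is proved, stated in full; the proofs are below) =====
def Claim_equal_to_elevenary : Prop := ∀ (number : Int), Dom_to_elevenary number → Spec_to_elevenary number (to_elevenary number)

-- ===== LEMMAS AND PROOFS =====

-- loop invariant: A's loop computes value + power * (B's value of the remaining number)
theorem loopA_eq (k : Nat) : ∀ n : Int, n.toNat ≤ k →
    ∀ v p : Int, toElevenaryLoopA n v p = v + p * to_elevenary_alt n := by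
  induction k with
  | zero =>
    intro n hk v p
    have h : ¬ 0 < n := by omega
    rw [toElevenaryLoopA, dif_neg h, to_elevenary_alt, dif_pos (by omega : n ≤ 0)]
    ring
  | succ k ih =>
    intro n hk v p
    by_cases h : 0 < n
    · have hlt : (PySem.Int.floordiv n 11).toNat ≤ k := by
        have := pvFloordiv11_toNat_lt n h
        omega
      rw [toElevenaryLoopA, dif_pos h, ih _ hlt]
      conv_rhs => rw [to_elevenary_alt, dif_neg (by omega : ¬ n ≤ 0)]
      ring
    · rw [toElevenaryLoopA, dif_neg h, to_elevenary_alt, dif_pos (by omega : n ≤ 0)]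
      ring

-- ===== VERDICT (by name: the statement is the Claim_ definition above) =====
theorem to_elevenary_spec : Claim_equal_to_elevenary := by
  intro n _
  show to_elevenary n = to_elevenary_alt n
  rw [to_elevenary, loopA_eq n.toNat n le_rfl]
  ring
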